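-- pv_equiv track=rewrite | github.com/alexpArtos/Coding | SumXor.py | generate_all_values_to_list
-- ===== SOURCE A (Python) =====
-- def generate_all_values_to_list(a, free_bits):
--     '''
--         Creates a list with all variants that have a as their base format.
--         For each free bit i, creates a copy of all values currently in the list
--         with the single difference bit i = 1.
--         Each step doubles the number of values in the list, and so the whole process
--         covers all combinations of the free bit positions.
--     '''
--     values = [a]
--     # for each bit 1 in the the xor mask
--     for index in free_bits:
--         # copy each value in the list
--         newvalues = []
--         for value in values:
--             # while setting this bit to 1
--             newvalue = value | (1 << index)
--             newvalues.append(newvalue)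
--         values = values + newvalues
--     return values
-- ===== SOURCE B (Python) =====
-- def generate_all_values_to_list(a, free_bits):
--     # Enumerate subsets by index: output slot i selects free_bits[j] iff bit j of i is set.
--     bits = list(free_bits)
--     out = []
--     for i in range(2 ** len(bits)):
--         value = a
--         for j, bit in enumerate(bits):
--             if (i >> j) & 1:
--                 value |= (1 << bit)
--         out.append(value)
--     return out
-- ===== Notes on version B (the rewrite author's own statement) =====
-- stated objective: alternative
-- what changed: Replaces the list-doubling loop (append a bit-set copy of all values per free bit) by direct subset enumeration: one counter i over range(2**len(free_bits)) whose binary digits select which free bits to OR in, producing the same list in the same order.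
import Mathlib
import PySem

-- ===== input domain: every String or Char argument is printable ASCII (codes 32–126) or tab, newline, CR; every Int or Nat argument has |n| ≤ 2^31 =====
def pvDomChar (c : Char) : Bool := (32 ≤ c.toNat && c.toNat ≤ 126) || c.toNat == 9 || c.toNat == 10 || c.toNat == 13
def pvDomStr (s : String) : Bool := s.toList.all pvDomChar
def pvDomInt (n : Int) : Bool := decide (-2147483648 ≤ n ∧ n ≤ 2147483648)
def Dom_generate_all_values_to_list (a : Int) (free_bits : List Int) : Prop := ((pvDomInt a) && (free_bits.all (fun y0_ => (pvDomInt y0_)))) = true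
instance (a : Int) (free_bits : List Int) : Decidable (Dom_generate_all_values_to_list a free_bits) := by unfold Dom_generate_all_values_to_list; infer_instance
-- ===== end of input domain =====

-- B replaces A's per-bit list doubling by direct subset enumeration over a counter (alternative decomposition, same result order).


-- ===== PORT A =====
-- A: start from [a]; for each free bit, append a copy of every current value with that bit set.
-- '1 << index' is exact as '(2 : Int) ^ index.toNat' because Pre_ guarantees 0 ≤ index.
def generate_all_values_to_list (a : Int) (free_bits : List Int) : List Int :=
  free_bits.foldl
    (fun values index =>
      values ++ values.map (fun value => Int.lor value ((2 : Int) ^ index.toNat)))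
    [a]

-- ===== PORT B =====
-- B's inner loop 'for j, bit in enumerate(bits): if (i >> j) & 1: value |= (1 << bit)'.
def pvSetBits (i : Nat) (j : Nat) (bits : List Int) (value : Int) : Int :=
  match bits with
  | [] => value
  | bit :: rest =>
      pvSetBits i (j + 1) rest
        (if (i >>> j) &&& 1 == 1 then Int.lor value ((2 : Int) ^ bit.toNat) else value)

def generate_all_values_to_list_alt (a : Int) (free_bits : List Int) : List Int :=
  (List.range (2 ^ free_bits.length)).map (fun i => pvSetBits i 0 free_bits a)

-- ===== PRECONDITION & SPEC =====
-- Pre_ excludes exactly a negative entry in free_bits, on which Python A raises ValueError ('negative shift count').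
def Pre_generate_all_values_to_list (a : Int) (free_bits : List Int) : Prop :=
  ∀ b ∈ free_bits, 0 ≤ b
instance (a : Int) (free_bits : List Int) : Decidable (Pre_generate_all_values_to_list a free_bits) := by
  unfold Pre_generate_all_values_to_list; infer_instance
def pvWitness_generate_all_values_to_list : Int × List Int := (5, [0, 2, 3])

def Spec_generate_all_values_to_list (a : Int) (free_bits : List Int) (out : List Int) : Prop := out = generate_all_values_to_list_alt a free_bits
instance (a : Int) (free_bits : List Int) (out : List Int) : Decidable (Spec_generate_all_values_to_list a free_bits out) := by unfold Spec_generate_all_values_to_list; infer_instance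

-- ===== CLAIM (what is proved, stated in full; the proofs are below) =====
def Claim_equal_generate_all_values_to_list : Prop := ∀ (a : Int) (free_bits : List Int), Dom_generate_all_values_to_list a free_bits → Pre_generate_all_values_to_list a free_bits → Spec_generate_all_values_to_list a free_bits (generate_all_values_to_list a free_bits)

-- ===== LEMMAS AND PROOFS =====

-- pvSetBits splits over list append.
theorem pvSetBits_append (i : Nat) (bs cs : List Int) :
    ∀ (j : Nat) (v : Int),
      pvSetBits i j (bs ++ cs) v = pvSetBits i (j + bs.length) cs (pvSetBits i j bs v) := by
  induction bs with
  | nil => intro j v; simp [pvSetBits]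
  | cons b rest ih =>
      intro j v
      simp only [List.cons_append, pvSetBits, List.length_cons, ih]
      ring_nf

-- pvSetBits only looks at bits j..j+|bs|-1 of the counter.
theorem pvSetBits_congr (i₁ i₂ : Nat) (bs : List Int) :
    ∀ (j : Nat) (v : Int),
      (∀ k, j ≤ k → k < j + bs.length → (i₁ >>> k) &&& 1 = (i₂ >>> k) &&& 1) →
      pvSetBits i₁ j bs v = pvSetBits i₂ j bs v := by
  induction bs with
  | nil => intro j v _; simp [pvSetBits]
  | cons b rest ih =>
      intro j v h
      simp only [pvSetBits]
      rw [h j (le_refl j) (by simp only [List.length_cons]; omega)]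
      exact ih (j + 1) _ (fun k hk1 hk2 => h k (by omega)
        (by simp only [List.length_cons] at hk2 ⊢; omega))

theorem bit_low_add_pow (n k i : Nat) (hk : k < n) (_hi : i < 2 ^ n) :
    ((2 ^ n + i) >>> k) &&& 1 = (i >>> k) &&& 1 := by
  have hkn : 2 ^ n = 2 ^ k * (2 * 2 ^ (n - k - 1)) := by
    rw [← pow_succ']
    rw [← pow_add]
    congr 1
    omega
  rw [Nat.shiftRight_eq_div_pow, Nat.shiftRight_eq_div_pow, Nat.and_one_is_mod,
      Nat.and_one_is_mod, hkn, Nat.mul_add_div (Nat.two_pow_pos k)]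
  omega

theorem bit_top_lo (n i : Nat) (hi : i < 2 ^ n) : (i >>> n) &&& 1 = 0 := by
  rw [Nat.shiftRight_eq_div_pow, Nat.and_one_is_mod, Nat.div_eq_of_lt hi]

theorem bit_top_hi (n i : Nat) (hi : i < 2 ^ n) : ((2 ^ n + i) >>> n) &&& 1 = 1 := by
  rw [Nat.shiftRight_eq_div_pow, Nat.and_one_is_mod]
  rw [Nat.add_comm, Nat.add_div_right i (Nat.two_pow_pos n), Nat.div_eq_of_lt hi]

-- Main invariant: A's doubling fold equals B's subset enumeration, by reverse induction on the bit list.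
theorem main_eq (a : Int) (bs : List Int) :
    generate_all_values_to_list a bs = generate_all_values_to_list_alt a bs := by
  induction bs using List.reverseRecOn with
  | nil => simp [generate_all_values_to_list, generate_all_values_to_list_alt, pvSetBits]
  | append_singleton bs b ih =>
      unfold generate_all_values_to_list generate_all_values_to_list_alt at *
      set n := bs.length with hn
      rw [List.foldl_append, ih]
      simp only [List.foldl_cons, List.foldl_nil, List.length_append, List.length_cons,
        List.length_nil]
      have hpow : 2 ^ (n + (0 + 1)) = 2 ^ n + 2 ^ n := by ring
      rw [hpow, List.range_add, List.map_append, List.map_map, List.map_map]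
      congr 1
      · -- first half: counter < 2^n, top bit 0, appended bit b untouched
        apply List.map_congr_left
        intro i hi
        rw [List.mem_range] at hi
        rw [pvSetBits_append]
        simp only [Nat.zero_add, pvSetBits]
        rw [show ((i >>> bs.length) &&& 1 == 1) = false by
          rw [← hn]; simp [bit_top_lo n i hi]]
        simp
      · -- second half: counter 2^n + i, top bit 1, low bits unchanged
        apply List.map_congr_left
        intro i hi
        rw [List.mem_range] at hi
        simp only [Function.comp]
        rw [pvSetBits_append]
        simp only [Nat.zero_add, pvSetBits]
        rw [show (((2 ^ n + i) >>> bs.length) &&& 1 == 1) = true by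
          rw [← hn]; simp [bit_top_hi n i hi]]
        rw [pvSetBits_congr (2 ^ n + i) i bs 0 a
          (fun k hk1 hk2 => bit_low_add_pow n k i (by omega) hi)]
        simp

-- ===== VERDICT (by name: the statement is the Claim_ definition above) =====
theorem generate_all_values_to_list_spec : Claim_equal_generate_all_values_to_list := by
  intro a fb _ _
  unfold Spec_generate_all_values_to_list
  exact main_eq a fb
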